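-- pv_equiv track=rewrite | github.com/Atulkmrsingh/-Intelligent-Autograder-with-Large-Language-Models | makeEmbedding.py | find_page_number
-- ===== SOURCE A (Python) =====
-- def find_page_number(text, sentence_index):
--     lines = text.split('\n')
--     total_lines = 0
--     for i, line in enumerate(lines):
--         total_lines += len(line.split('\n'))
--         if total_lines > sentence_index:
--             return i + 1
--     return len(lines)  # Return the last page if not found
-- ===== SOURCE B (Python) =====
-- def find_page_number(text, sentence_index):
--     # Each element of text.split('\n') contains no '\n', so A's running total
--     # after processing line i is exactly i + 1; the first i with i + 1 > sentence_index
--     # is max(sentence_index, 0), clamped to the number of lines.  No loop needed.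
--     lines = text.split('\n')
--     return min(max(sentence_index + 1, 1), len(lines))
-- ===== Notes on version B (the rewrite author's own statement) =====
-- stated objective: simpler
-- what changed: Replaced A's enumerate loop with a running re-split counter by a closed-form clamp: min(max(sentence_index+1, 1), len(lines)), after observing each split piece re-splits to length 1.
import Mathlib
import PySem

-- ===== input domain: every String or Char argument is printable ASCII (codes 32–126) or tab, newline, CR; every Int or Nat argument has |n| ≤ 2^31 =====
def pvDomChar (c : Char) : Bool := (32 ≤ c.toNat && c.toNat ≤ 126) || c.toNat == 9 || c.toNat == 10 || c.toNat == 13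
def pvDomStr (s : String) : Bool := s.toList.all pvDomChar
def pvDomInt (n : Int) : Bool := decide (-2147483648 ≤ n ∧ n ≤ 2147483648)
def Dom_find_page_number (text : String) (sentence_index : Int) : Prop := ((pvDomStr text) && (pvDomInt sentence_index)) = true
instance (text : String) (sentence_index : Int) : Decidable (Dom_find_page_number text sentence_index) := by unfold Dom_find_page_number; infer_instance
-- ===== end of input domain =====

-- One honest line: B replaces A's running-total loop over the split lines by a closed-form
-- clamp min(max(sentence_index+1,1), len(lines)); objective: simpler.

-- ===== PORT A =====
-- '\n' is a non-empty separator, so text.split('\n') never raises: split? is `some` here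
-- and `.getD []` merely unwraps it.
def findPageGo (lines : List String) (i : Nat) (total : Int) (sentence_index : Int)
    (dflt : Int) : Int :=
  match lines with
  | [] => dflt
  | line :: rest =>
      let total := total + (((PySem.Str.split? line "\n").getD []).length : Int)
      if total > sentence_index then ((i : Int) + 1)
      else findPageGo rest (i + 1) total sentence_index dflt

def find_page_number (text : String) (sentence_index : Int) : Int :=
  let lines := (PySem.Str.split? text "\n").getD []
  findPageGo lines 0 0 sentence_index (lines.length : Int)

-- ===== PORT B =====
def find_page_number_alt (text : String) (sentence_index : Int) : Int :=
  let lines := (PySem.Str.split? text "\n").getD []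
  min (max (sentence_index + 1) 1) (lines.length : Int)

-- ===== PRECONDITION & SPEC =====
def Spec_find_page_number (text : String) (sentence_index : Int) (out : Int) : Prop := out = find_page_number_alt text sentence_index
instance (text : String) (sentence_index : Int) (out : Int) : Decidable (Spec_find_page_number text sentence_index out) := by unfold Spec_find_page_number; infer_instance

-- ===== CLAIM (what is proved, stated in full; the proofs are below) =====
def Claim_equal_find_page_number : Prop := ∀ (text : String) (sentence_index : Int), Dom_find_page_number text sentence_index → Spec_find_page_number text sentence_index (find_page_number text sentence_index)

-- ===== LEMMAS AND PROOFS =====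

-- splitOn.go on a chunk free of sep just emits cur.reverse ++ l as the final piece

theorem go_of_not_infix (sep : List Char) :
    ∀ (fuel : Nat) (l cur : List Char) (acc : List (List Char)), ¬ sep <:+: l →
      PySem.Chars.splitOn.go sep fuel l cur acc = ((cur.reverse ++ l) :: acc).reverse := by
  intro fuel
  induction fuel with
  | zero => intro l cur acc _; simp [PySem.Chars.splitOn.go]
  | succ n ih =>
    intro l cur acc h
    match l with
    | [] => simp [PySem.Chars.splitOn.go]
    | c :: rest =>
      have hpre : sep.isPrefixOf (c :: rest) = false := by
        by_contra hb
        simp only [Bool.not_eq_false] at hb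
        rw [List.isPrefixOf_iff_prefix] at hb
        exact h hb.isInfix
      have hrest : ¬ sep <:+: rest := fun hi => h (hi.trans (List.suffix_cons c rest).isInfix)
      rw [show PySem.Chars.splitOn.go sep (n+1) (c :: rest) cur acc
            = PySem.Chars.splitOn.go sep n rest (c :: cur) acc by
          simp [PySem.Chars.splitOn.go, hpre]]
      rw [ih rest (c :: cur) acc hrest]
      simp

theorem splitOn_of_not_infix (sep p : List Char) (h : ¬ sep <:+: p) :
    PySem.Chars.splitOn p sep = [p] := by
  rw [PySem.Chars.splitOn, go_of_not_infix sep _ p [] [] h]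
  simp

theorem go_mem_not_infix (sep : List Char) (hsep : sep ≠ []) :
    ∀ (fuel : Nat) (l cur : List Char) (acc : List (List Char)),
      l.length < fuel →
      (∀ k, k < cur.length → ¬ sep <+: (cur.reverse ++ l).drop k) →
      (∀ p ∈ acc, ¬ sep <:+: p) →
      ∀ p ∈ PySem.Chars.splitOn.go sep fuel l cur acc, ¬ sep <:+: p := by
  intro fuel
  induction fuel with
  | zero => intro l cur acc hf; omega
  | succ n ih =>
    intro l cur acc hf hcur hacc
    have hseplen : 1 ≤ sep.length := List.length_pos_iff.mpr hsep
    have hcurrev : ¬ sep <:+: cur.reverse := by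
      rintro ⟨a, b, hab⟩
      have hlen := congrArg List.length hab
      simp at hlen
      have hk : a.length < cur.length := by omega
      apply hcur a.length hk
      have heq : cur.reverse ++ l = a ++ (sep ++ (b ++ l)) := by
        rw [← hab]; simp
      rw [heq, List.drop_left]
      exact List.prefix_append sep (b ++ l)
    match l with
    | [] =>
      intro p hp
      rw [show PySem.Chars.splitOn.go sep (n+1) [] cur acc = (cur.reverse :: acc).reverse by
            simp [PySem.Chars.splitOn.go]] at hp
      simp at hp
      rcases hp with h1 | h2
      · exact hacc p h1
      · subst h2; exact hcurrev
    | c :: rest =>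
      by_cases hpre : sep.isPrefixOf (c :: rest) = true
      · rw [show PySem.Chars.splitOn.go sep (n+1) (c :: rest) cur acc
              = PySem.Chars.splitOn.go sep n ((c :: rest).drop sep.length) [] (cur.reverse :: acc) by
            simp [PySem.Chars.splitOn.go, hpre]]
        apply ih
        · simp only [List.length_drop, List.length_cons] at *; omega
        · intro k hk; simp at hk
        · intro p hp
          simp at hp
          rcases hp with h1 | h2
          · subst h1; exact hcurrev
          · exact hacc p h2
      · simp only [Bool.not_eq_true] at hpre
        rw [show PySem.Chars.splitOn.go sep (n+1) (c :: rest) cur acc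
              = PySem.Chars.splitOn.go sep n rest (c :: cur) acc by
            simp [PySem.Chars.splitOn.go, hpre]]
        apply ih
        · simp at hf ⊢; omega
        · intro k hk
          simp only [List.length_cons] at hk
          have heq : (c :: cur).reverse ++ rest = cur.reverse ++ (c :: rest) := by simp
          rw [heq]
          rcases Nat.lt_or_ge k cur.length with hlt | hge
          · exact hcur k hlt
          · have hk' : k = cur.length := by omega
            subst hk'
            rw [List.drop_left' (by simp)]
            intro hpref
            have : sep.isPrefixOf (c :: rest) = true := by
              rw [List.isPrefixOf_iff_prefix]; exact hpref
            rw [this] at hpre; simp at hpre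
        · exact hacc

theorem mem_splitOn_not_infix (sep s : List Char) (hsep : sep ≠ []) :
    ∀ p ∈ PySem.Chars.splitOn s sep, ¬ sep <:+: p := by
  rw [PySem.Chars.splitOn]
  exact go_mem_not_infix sep hsep (s.length + 1) s [] []
    (by omega) (by intro k hk; simp at hk) (by intro p hp; simp at hp)

theorem go_ne_nil (sep : List Char) :
    ∀ (fuel : Nat) (l cur : List Char) (acc : List (List Char)),
      PySem.Chars.splitOn.go sep fuel l cur acc ≠ [] := by
  intro fuel
  induction fuel with
  | zero => intro l cur acc; simp [PySem.Chars.splitOn.go]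
  | succ n ih =>
    intro l cur acc
    match l with
    | [] => simp [PySem.Chars.splitOn.go]
    | c :: rest =>
      by_cases hpre : sep.isPrefixOf (c :: rest) = true
      · rw [show PySem.Chars.splitOn.go sep (n+1) (c :: rest) cur acc
              = PySem.Chars.splitOn.go sep n ((c :: rest).drop sep.length) [] (cur.reverse :: acc) by
            simp [PySem.Chars.splitOn.go, hpre]]
        exact ih _ _ _
      · simp only [Bool.not_eq_true] at hpre
        rw [show PySem.Chars.splitOn.go sep (n+1) (c :: rest) cur acc
              = PySem.Chars.splitOn.go sep n rest (c :: cur) acc by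
            simp [PySem.Chars.splitOn.go, hpre]]
        exact ih _ _ _

theorem splitOn_ne_nil (sep s : List Char) : PySem.Chars.splitOn s sep ≠ [] := by
  rw [PySem.Chars.splitOn]; exact go_ne_nil sep _ s [] []

theorem findPageGo_eq (sentence_index dflt : Int) :
    ∀ (lines : List String) (i : Nat),
      (∀ l ∈ lines, ((PySem.Str.split? l "\n").getD []).length = 1) →
      findPageGo lines i (i : Int) sentence_index dflt =
        if lines = [] then dflt
        else if sentence_index ≤ (i : Int) then (i : Int) + 1
        else if sentence_index < (i : Int) + lines.length then sentence_index + 1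
        else dflt := by
  intro lines
  induction lines with
  | nil => intro i _; simp [findPageGo]
  | cons line rest ih =>
    intro i h1
    have hline : ((PySem.Str.split? line "\n").getD []).length = 1 :=
      h1 line (List.mem_cons_self)
    have hrest : ∀ l ∈ rest, ((PySem.Str.split? l "\n").getD []).length = 1 :=
      fun l hl => h1 l (List.mem_cons_of_mem _ hl)
    rw [findPageGo]
    simp only [hline, List.length_cons, Nat.cast_one]
    rw [if_neg (show ¬(line :: rest = []) by simp)]
    by_cases hc : (i : Int) + 1 > sentence_index
    · rw [if_pos hc, if_pos (by omega : sentence_index ≤ (i : Int))]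
    · rw [if_neg hc,
        show ((i : Int) + 1) = ((i + 1 : Nat) : Int) by push_cast; ring,
        ih (i + 1) hrest,
        if_neg (by omega : ¬ sentence_index ≤ (i : Int))]
      by_cases hr : rest = []
      · subst hr
        rw [if_pos rfl]
        simp only [List.length_nil]
        push_cast
        split_ifs <;> omega
      · rw [if_neg hr]
        have hrl : 1 ≤ rest.length := List.length_pos_iff.mpr hr
        push_cast
        split_ifs <;> omega

-- every piece produced by text.split('\n') contains no '\n', so re-splitting it has length 1
theorem lines_piece_one (text line : String)
    (h : line ∈ (PySem.Str.split? text "\n").getD []) :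
    ((PySem.Str.split? line "\n").getD []).length = 1 := by
  have hs : ("\n" : String).toList = ['\n'] := rfl
  rw [PySem.Str.split?.eq_1, hs, PySem.Chars.split?.eq_1] at h
  simp at h
  obtain ⟨p, hp, rfl⟩ := h
  have hni : ¬ ['\n'] <:+: p := mem_splitOn_not_infix _ _ (by simp) p hp
  rw [PySem.Str.split?.eq_1, hs, PySem.Chars.split?.eq_1]
  simp [splitOn_of_not_infix _ _ hni]

theorem lines_ne_nil (text : String) : (PySem.Str.split? text "\n").getD [] ≠ [] := by
  have hs : ("\n" : String).toList = ['\n'] := rfl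
  rw [PySem.Str.split?.eq_1, hs, PySem.Chars.split?.eq_1]
  simp [splitOn_ne_nil]

-- ===== VERDICT (by name: the statement is the Claim_ definition above) =====
theorem find_page_number_spec : Claim_equal_find_page_number := by
  unfold Claim_equal_find_page_number Spec_find_page_number
  intro text si _
  show find_page_number text si = find_page_number_alt text si
  rw [show find_page_number text si
        = findPageGo ((PySem.Str.split? text "\n").getD []) 0 0 si
            (((PySem.Str.split? text "\n").getD []).length : Int) from rfl,
      show find_page_number_alt text si
        = min (max (si + 1) 1) (((PySem.Str.split? text "\n").getD []).length : Int) from rfl]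
  have h1 : ∀ l ∈ (PySem.Str.split? text "\n").getD [],
      ((PySem.Str.split? l "\n").getD []).length = 1 :=
    fun l hl => lines_piece_one text l hl
  have h2 : (PySem.Str.split? text "\n").getD [] ≠ [] := lines_ne_nil text
  have h3 : 1 ≤ ((PySem.Str.split? text "\n").getD []).length := List.length_pos_iff.mpr h2
  have heq := findPageGo_eq si (((PySem.Str.split? text "\n").getD []).length : Int)
    ((PySem.Str.split? text "\n").getD []) 0 h1
  simp only [Nat.cast_zero] at heq
  rw [heq, if_neg h2]
  split_ifs <;> omega
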